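-- pv_equiv track=rewrite | github.com/UchihaSean/ReinforcementLearningForDialogue | QA/TFIDF.py | generate_idf_dict
-- ===== SOURCE A (Python) =====
-- def generate_idf_dict(word_list):
--     """
--     Generate word dictionary based on train data
--     """
--     dict = {}
--     for i in range(len(word_list)):
--         flag = set()
--         for j in range(len(word_list[i])):
--             if word_list[i][j] in flag: continue
--             if word_list[i][j] not in dict:
--                 dict[word_list[i][j]] = 1
--             else:
--                 dict[word_list[i][j]] += 1
--             flag.add(word_list[i][j])
--
--     return dict
-- ===== SOURCE B (Python) =====
-- def generate_idf_dict(word_list):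
--     """
--     Generate word dictionary based on train data
--     """
--     vocab = list(dict.fromkeys(w for doc in word_list for w in doc))
--     doc_sets = [set(doc) for doc in word_list]
--     return {w: sum(1 for s in doc_sets if w in s) for w in vocab}
-- ===== Notes on version B (the rewrite author's own statement) =====
-- stated objective: alternative
-- what changed: B inverts the loop structure: it first builds the global vocabulary (ordered dedup of all tokens) and per-document member sets, then computes each word's count by scanning the documents for membership, instead of A's single pass that increments a running dict per token under a per-document flag-set guard.
import Mathlib
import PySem

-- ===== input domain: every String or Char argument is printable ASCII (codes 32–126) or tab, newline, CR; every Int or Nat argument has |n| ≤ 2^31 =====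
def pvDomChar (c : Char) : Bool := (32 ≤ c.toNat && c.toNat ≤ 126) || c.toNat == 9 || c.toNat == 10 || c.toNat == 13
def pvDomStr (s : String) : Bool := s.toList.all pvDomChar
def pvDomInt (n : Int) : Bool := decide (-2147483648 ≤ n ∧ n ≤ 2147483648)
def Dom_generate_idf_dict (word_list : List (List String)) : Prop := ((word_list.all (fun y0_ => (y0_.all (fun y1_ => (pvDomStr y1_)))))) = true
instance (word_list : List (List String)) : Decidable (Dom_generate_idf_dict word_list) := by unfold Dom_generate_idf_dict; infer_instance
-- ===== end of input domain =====

-- B inverts the loop structure: global vocabulary first, then a per-word scan counting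
-- the documents that contain it, instead of A's running per-token counter with a flag set; objective: alternative.


-- ===== PORT A =====
-- inner loop body: skip tokens already in flag, else bump the dict and record in flag
def genIdfStepA (st : PySem.Dict String Int × PySem.Set String) (w : String) :
    PySem.Dict String Int × PySem.Set String :=
  if PySem.Set.contains st.2 w then st
  else
    (if st.1.contains w = false then st.1.insert w 1
     else st.1.insert w (st.1.getD w 0 + 1),
     PySem.Set.add st.2 w)

def generate_idf_dict (word_list : List (List String)) : List (String × Int) :=
  (word_list.foldl
    (fun d doc => (doc.foldl genIdfStepA (d, PySem.Set.empty)).1)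
    PySem.Dict.empty).items

-- ===== PORT B =====
def generate_idf_dict_alt (word_list : List (List String)) : List (String × Int) :=
  -- vocab = list(dict.fromkeys(w for doc in word_list for w in doc))
  let vocab := PySem.List.dedup (word_list.flatMap (fun doc => doc))
  -- doc_sets = [set(doc) for doc in word_list]
  let doc_sets := word_list.map (fun doc => PySem.Set.ofList doc)
  -- {w: sum(1 for s in doc_sets if w in s) for w in vocab}
  (vocab.foldl
    (fun d w => d.insert w
      (doc_sets.foldl (fun acc s => if w ∈ s then acc + 1 else acc) (0 : Int)))
    PySem.Dict.empty).items

-- ===== PRECONDITION & SPEC =====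
def Spec_generate_idf_dict (word_list : List (List String)) (out : List (String × Int)) : Prop := out = generate_idf_dict_alt word_list
instance (word_list : List (List String)) (out : List (String × Int)) : Decidable (Spec_generate_idf_dict word_list out) := by unfold Spec_generate_idf_dict; infer_instance

-- ===== CLAIM (what is proved, stated in full; the proofs are below) =====
def Claim_equal_generate_idf_dict : Prop := ∀ (word_list : List (List String)), Dom_generate_idf_dict word_list → Spec_generate_idf_dict word_list (generate_idf_dict word_list)

-- ===== LEMMAS AND PROOFS =====

-- the tokens of doc that A's inner loop actually processes, given the flag set so far
def genIdfFresh : List String → PySem.Set String → List String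
  | [], _ => []
  | w :: ws, flag =>
      if PySem.Set.contains flag w then genIdfFresh ws flag
      else w :: genIdfFresh ws (PySem.Set.add flag w)

theorem genIdf_inner_eq (doc : List String) (d : PySem.Dict String Int)
    (flag : PySem.Set String) :
    (doc.foldl genIdfStepA (d, flag)).1 =
      (genIdfFresh doc flag).foldl (fun df w => df.insert w (df.getD w 0 + 1)) d := by
  induction doc generalizing d flag with
  | nil => rfl
  | cons w ws ih =>
    simp only [List.foldl_cons, genIdfStepA, genIdfFresh]
    by_cases h : PySem.Set.contains flag w
    · have hm : w ∈ flag := by simpa using h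
      simp [hm, ih]
    · have hm : w ∉ flag := by simpa using h
      rw [if_neg h, if_neg h, List.foldl_cons, ih]
      congr 1
      by_cases hc : d.contains w
      · simp [hc]
      · simp only [Bool.not_eq_true] at hc
        simp [hc, PySem.Dict.getD_of_not_contains d 0 hc]

theorem genIdf_update_eq (doc : List String) (flag : PySem.Set String) :
    PySem.Set.update flag doc = flag ++ genIdfFresh doc flag := by
  induction doc generalizing flag with
  | nil => simp [PySem.Set.update, genIdfFresh]
  | cons w ws ih =>
    rw [PySem.Set.update_cons, genIdfFresh]
    by_cases h : PySem.Set.contains flag w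
    · have hm : w ∈ flag := by simpa using h
      simp [hm, ih]
    · have hm : w ∉ flag := by simpa using h
      have hadd : PySem.Set.add flag w = flag ++ [w] := by simp [PySem.Set.add, hm]
      rw [if_neg h, ih, hadd, List.append_assoc]
      rfl

theorem genIdfFresh_empty (doc : List String) :
    genIdfFresh doc PySem.Set.empty = PySem.List.dedup doc := by
  have h := genIdf_update_eq doc PySem.Set.empty
  simp only [PySem.Set.empty, PySem.Set.update_nil_left, List.nil_append] at h
  simpa [PySem.List.dedup_eq_ofList, PySem.Set.empty] using h.symm

-- abbreviation for the per-document step of the intermediate (dedup-fold) form of A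
def genIdfStepC (df : PySem.Dict String Int) (doc : List String) : PySem.Dict String Int :=
  (PySem.List.dedup doc).foldl (fun df w => df.insert w (df.getD w 0 + 1)) df

theorem genIdf_A_eq_C (word_list : List (List String)) :
    generate_idf_dict word_list = (word_list.foldl genIdfStepC PySem.Dict.empty).items := by
  unfold generate_idf_dict genIdfStepC
  have hfun : (fun (d : PySem.Dict String Int) (doc : List String) =>
      (doc.foldl genIdfStepA (d, PySem.Set.empty)).1) =
      (fun (df : PySem.Dict String Int) (doc : List String) =>
        (PySem.List.dedup doc).foldl (fun df w => df.insert w (df.getD w 0 + 1)) df) := by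
    funext d doc
    rw [genIdf_inner_eq, genIdfFresh_empty]
  rw [hfun]

theorem count_dedup (doc : List String) (w : String) :
    (PySem.List.dedup doc).count w = if w ∈ doc then 1 else 0 := by
  by_cases h : w ∈ doc
  · rw [if_pos h]
    exact List.count_eq_one_of_mem (by simp [PySem.Set.nodup_ofList doc])
      (by simpa using h)
  · rw [if_neg h]
    exact List.count_eq_zero_of_not_mem (by simpa using h)

theorem genIdf_getD_C (L : List (List String)) (d : PySem.Dict String Int) (w : String) :
    (L.foldl genIdfStepC d).getD w 0 =
      d.getD w 0 + L.foldl (fun acc doc => if w ∈ doc then acc + 1 else acc) (0 : Int) := by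
  induction L generalizing d with
  | nil => simp
  | cons doc rest ih =>
    rw [List.foldl_cons, ih]
    have hstep : (genIdfStepC d doc).getD w 0 =
        d.getD w 0 + (if w ∈ doc then (1 : Int) else 0) := by
      unfold genIdfStepC
      rw [PySem.Dict.getD_foldl_insert_add_one, count_dedup]
      split_ifs <;> simp
    rw [hstep]
    have hshift : ∀ (rest : List (List String)) (a : Int),
        rest.foldl (fun acc doc => if w ∈ doc then acc + 1 else acc) a =
          a + rest.foldl (fun acc doc => if w ∈ doc then acc + 1 else acc) 0 := by
      intro rest
      induction rest with
      | nil => intro a; simp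
      | cons t ts iht =>
        intro a
        simp only [List.foldl_cons]
        rw [iht, iht (if w ∈ t then 0 + 1 else 0)]
        split_ifs <;> ring
    rw [List.foldl_cons, hshift rest (if w ∈ doc then (0:Int) + 1 else 0)]
    split_ifs <;> ring

theorem update_dedup (s : PySem.Set String) (doc : List String) :
    PySem.Set.update s (PySem.List.dedup doc) = PySem.Set.update s doc := by
  rw [PySem.Set.update_eq_append_filter, PySem.Set.update_eq_append_filter]
  simp [PySem.List.dedup_eq_ofList, PySem.Set.ofList_ofList]

theorem genIdf_keys_C (L : List (List String)) (d : PySem.Dict String Int) :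
    (L.foldl genIdfStepC d).keys =
      PySem.Set.update d.keys (L.flatMap (fun doc => doc)) := by
  induction L generalizing d with
  | nil => simp [PySem.Set.update]
  | cons doc rest ih =>
    rw [List.foldl_cons, ih, List.flatMap_cons, PySem.Set.update_append]
    congr 1
    unfold genIdfStepC
    rw [PySem.Dict.keys_foldl_insert, update_dedup]

theorem genIdf_C_items (word_list : List (List String)) :
    (word_list.foldl genIdfStepC PySem.Dict.empty).items =
      (PySem.List.dedup (word_list.flatMap (fun doc => doc))).map
        (fun w => (w,
          word_list.foldl (fun acc doc => if w ∈ doc then acc + 1 else acc) (0 : Int))) := by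
  have hkeys : (word_list.foldl genIdfStepC PySem.Dict.empty).keys =
      PySem.List.dedup (word_list.flatMap (fun doc => doc)) := by
    rw [genIdf_keys_C]
    simp [PySem.Dict.keys_empty, PySem.Set.update_nil_left, PySem.List.dedup_eq_ofList]
  have hnd : (word_list.foldl genIdfStepC PySem.Dict.empty).keys.Nodup := by
    rw [hkeys]; simp [PySem.Set.nodup_ofList]
  rw [PySem.Dict.items_eq_map_keys _ hnd 0, hkeys]
  apply List.map_congr_left
  intro w _
  rw [genIdf_getD_C]
  simp

theorem genIdf_B_items (word_list : List (List String)) :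
    generate_idf_dict_alt word_list =
      (PySem.List.dedup (word_list.flatMap (fun doc => doc))).map
        (fun w => (w,
          word_list.foldl (fun acc doc => if w ∈ doc then acc + 1 else acc) (0 : Int))) := by
  unfold generate_idf_dict_alt
  have h := PySem.Dict.items_foldl_insert_fresh
      (l := PySem.List.dedup (word_list.flatMap (fun doc => doc))) (k := fun w => w)
      (v := fun w => (word_list.map (fun doc => PySem.Set.ofList doc)).foldl
        (fun acc s => if w ∈ s then acc + 1 else acc) (0 : Int))
      (d := PySem.Dict.empty)
      (fun a _ => PySem.Dict.contains_empty a)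
      (by simp [PySem.Set.nodup_ofList])
  refine h.trans ?_
  simp [List.foldl_map, PySem.Set.mem_ofList, PySem.Dict.empty]

-- ===== VERDICT (by name: the statement is the Claim_ definition above) =====
theorem generate_idf_dict_spec : Claim_equal_generate_idf_dict := by
  intro word_list _
  unfold Spec_generate_idf_dict
  rw [genIdf_A_eq_C, genIdf_C_items, genIdf_B_items]
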